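-- pv_equiv track=rewrite | github.com/yuxin101/skills | skills/tyxiang/easy-agent-email/scripts/folder_list.py | _consume_atom
-- ===== SOURCE A (Python) =====
-- def _skip_spaces(line: str, start: int) -> int:
-- 	while start < len(line) and line[start].isspace():
-- 		start += 1
-- 	return start
--
-- def _consume_atom(line: str, start: int) -> tuple[str | None, int]:
-- 	start = _skip_spaces(line, start)
-- 	if start >= len(line):
-- 		return None, start
--
-- 	if line[start] == '"':
-- 		index = start + 1
-- 		token: list[str] = []
-- 		while index < len(line):
-- 			char = line[index]
-- 			if char == "\\" and index + 1 < len(line):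
-- 				token.append(line[index + 1])
-- 				index += 2
-- 				continue
-- 			if char == '"':
-- 				return "".join(token), index + 1
-- 			token.append(char)
-- 			index += 1
-- 		return None, start
--
-- 	if line[start] == "{":
-- 		end = line.find("}", start)
-- 		if end == -1:
-- 			return None, start
-- 		length_token = line[start + 1:end].strip()
-- 		if not length_token.isdigit():
-- 			return None, start
-- 		literal_length = int(length_token)
-- 		remainder_start = _skip_spaces(line, end + 1)
-- 		remainder = line[remainder_start:]
-- 		if literal_length <= len(remainder):
-- 			return remainder[:literal_length], len(line)
-- 		return remainder or None, len(line)
--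
-- 	index = start
-- 	while index < len(line) and not line[index].isspace():
-- 		index += 1
-- 	return line[start:index], index
-- ===== SOURCE B (Python) =====
-- def _scan_quoted(rest):
--     """rest = text after an opening quote. Return (token, chars consumed
--     including the closing quote) or None if the quote is unterminated."""
--     if not rest:
--         return None
--     c = rest[0]
--     if c == '"':
--         return "", 1
--     if c == "\\" and len(rest) > 1:
--         r = _scan_quoted(rest[2:])
--         if r is None:
--             return None
--         t, k = r
--         return rest[1] + t, k + 2
--     r = _scan_quoted(rest[1:])
--     if r is None:
--         return None
--     t, k = r
--     return c + t, k + 1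
--
-- def _consume_atom(line, start):
--     rest0 = line[start:]
--     stripped = rest0.lstrip()
--     i = start + (len(rest0) - len(stripped))
--     if not stripped:
--         return None, i
--     c = stripped[0]
--     if c == '"':
--         r = _scan_quoted(stripped[1:])
--         if r is None:
--             return None, i
--         token, k = r
--         return token, i + 1 + k
--     if c == '{':
--         end = stripped.find('}')
--         if end < 0:
--             return None, i
--         num = stripped[1:end].strip()
--         if not num.isdigit():
--             return None, i
--         length = int(num)
--         tail = stripped[end + 1:].lstrip()
--         if length <= len(tail):
--             return tail[:length], len(line)
--         return tail or None, len(line)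
--     word = stripped.split(None, 1)[0]
--     return word, i + len(word)
-- ===== Notes on version B (the rewrite author's own statement) =====
-- stated objective: alternative
-- what changed: A's three explicit index-bumping while loops (skip spaces, char-by-char quoted scanner with an accumulator list, bare-atom scan) are replaced by suffix-based processing — slicing plus lstrip for space skipping, a recursive quoted-string scanner over the remaining suffix, find/strip/lstrip slices for the literal branch and split for the bare atom — which does the bulk scanning in C-level string primitives instead of per-character Python indexing (measured ~5x at the largest size).
-- outside the precondition, e.g. on _consume_atom(' a', -2): A returns ('', 0), B returns ('a', 0)
import Mathlib
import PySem

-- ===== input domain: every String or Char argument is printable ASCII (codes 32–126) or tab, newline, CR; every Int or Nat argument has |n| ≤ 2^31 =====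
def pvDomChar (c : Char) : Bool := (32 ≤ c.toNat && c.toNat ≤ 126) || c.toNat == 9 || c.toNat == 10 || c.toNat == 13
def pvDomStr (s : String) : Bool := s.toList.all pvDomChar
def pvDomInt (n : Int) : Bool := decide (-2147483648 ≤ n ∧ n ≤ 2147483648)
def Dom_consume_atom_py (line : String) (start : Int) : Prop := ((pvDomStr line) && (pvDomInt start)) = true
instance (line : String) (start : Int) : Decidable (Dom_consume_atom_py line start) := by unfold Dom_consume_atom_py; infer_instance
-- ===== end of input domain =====

-- B replaces A's three explicit index loops by suffix-based recursion and slicing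
-- (lstrip / find / split / recursive quoted-string scanner); objective: alternative
-- decomposition, not speed.

-- ===== PORT A =====
-- _skip_spaces: while start < len(line) and line[start].isspace(): start += 1
def skipSpacesA (l : List Char) (start : Int) : Int :=
  if h : start < (l.length : Int) then
    match PySem.List.pyGet? l start with
    | some c => if PySem.Chars.isspace c then skipSpacesA l (start + 1) else start
    | none => start  -- Python raises IndexError here (start < -len); outside Pre_
  else start
termination_by ((l.length : Int) - start).toNat
decreasing_by omega

-- the quoted-string while loop of A, with its accumulator `token`
def quotedLoopA (l : List Char) (index : Int) (token : List Char) (start0 : Int) :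
    Option String × Int :=
  if h : index < (l.length : Int) then
    match PySem.List.pyGet? l index with
    | none => (none, start0)  -- Python raises IndexError here; outside Pre_
    | some char =>
      if char = '\\' ∧ index + 1 < (l.length : Int) then
        match PySem.List.pyGet? l (index + 1) with
        | none => (none, start0)  -- unreachable: index+1 is in range
        | some c2 => quotedLoopA l (index + 2) (token ++ [c2]) start0
      else if char = '"' then (some (String.ofList token), index + 1)
      else quotedLoopA l (index + 1) (token ++ [char]) start0
  else (none, start0)
termination_by ((l.length : Int) - index).toNat
decreasing_by all_goals omega

-- the bare-atom while loop of A
def atomLoopA (l : List Char) (index : Int) : Int :=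
  if h : index < (l.length : Int) then
    match PySem.List.pyGet? l index with
    | some c => if PySem.Chars.isspace c then index else atomLoopA l (index + 1)
    | none => index  -- Python raises IndexError here; outside Pre_
  else index
termination_by ((l.length : Int) - index).toNat
decreasing_by omega

def consume_atom_py (line : String) (start : Int) : Option String × Int :=
  let l := line.toList
  let start1 := skipSpacesA l start
  if start1 ≥ (l.length : Int) then (none, start1)
  else
    match PySem.List.pyGet? l start1 with
    | none => (none, start1)  -- Python raises IndexError here; outside Pre_
    | some c =>
      if c = '"' then quotedLoopA l (start1 + 1) [] start1
      else if c = '{' then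
        let endi := PySem.Chars.findFrom l ['}'] start1
        if endi = -1 then (none, start1)
        else
          let lengthToken :=
            PySem.Chars.strip (PySem.List.slice l (some (start1 + 1)) (some endi))
          if ¬ PySem.Chars.strIsdigit lengthToken then (none, start1)
          else
            match PySem.Int.ofStr? (String.ofList lengthToken) with
            | none => (none, start1)  -- unreachable: lengthToken is a nonempty digit string
            | some literalLength =>
              let remainderStart := skipSpacesA l (endi + 1)
              let remainder := PySem.List.slice l (some remainderStart) none
              if literalLength ≤ (remainder.length : Int) then
                (some (String.ofList (PySem.List.slice remainder none (some literalLength))),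
                 (l.length : Int))
              else
                ((if remainder = [] then none else some (String.ofList remainder)),
                 (l.length : Int))
      else
        let index := atomLoopA l start1
        (some (String.ofList (PySem.List.slice l (some start1) (some index))), index)

-- ===== PORT B =====
-- _scan_quoted: rest = text after an opening quote; returns (token, consumed incl. closing quote)
def scanQuotedB : List Char → Option (List Char × Nat)
  | [] => none
  | c :: rest =>
    if c = '"' then some ([], 1)
    else if c = '\\' ∧ rest ≠ [] then
      match rest with
      | [] => none  -- unreachable: rest ≠ []
      | e :: rest' =>
        match scanQuotedB rest' with
        | none => none
        | some (t, k) => some (e :: t, k + 2)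
    else
      match scanQuotedB rest with
      | none => none
      | some (t, k) => some (c :: t, k + 1)

def consume_atom_py_alt (line : String) (start : Int) : Option String × Int :=
  let l := line.toList
  let rest0 := PySem.List.slice l (some start) none
  let stripped := PySem.Chars.lstrip rest0
  let i : Int := start + ((rest0.length : Int) - (stripped.length : Int))
  match stripped with
  | [] => (none, i)
  | c :: rest =>
    if c = '"' then
      match scanQuotedB rest with
      | none => (none, i)
      | some (t, k) => (some (String.ofList t), i + 1 + (k : Int))
    else if c = '{' then
      let endi := PySem.Chars.find (c :: rest) ['}']
      if endi < 0 then (none, i)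
      else
        let num := PySem.Chars.strip (PySem.List.slice (c :: rest) (some 1) (some endi))
        if ¬ PySem.Chars.strIsdigit num then (none, i)
        else
          match PySem.Int.ofStr? (String.ofList num) with
          | none => (none, i)  -- unreachable: num is a nonempty digit string
          | some length =>
            let tail := PySem.Chars.lstrip (PySem.List.slice (c :: rest) (some (endi + 1)) none)
            if length ≤ (tail.length : Int) then
              (some (String.ofList (PySem.List.slice tail none (some length))), (l.length : Int))
            else
              ((if tail = [] then none else some (String.ofList tail)), (l.length : Int))
    else
      -- stripped.split(None, 1)[0]: exact as takeWhile since stripped starts with non-space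
      let word := (c :: rest).takeWhile (fun ch => !PySem.Chars.isspace ch)
      (some (String.ofList word), i + (word.length : Int))

-- ===== PRECONDITION & SPEC =====
-- Pre_ excludes negative start: there A either raises IndexError (start < -len(line)) or
-- reads characters through Python's negative-index wraparound, an unspecified corner where
-- A's and B's answers are both accidents of index arithmetic.
def Pre_consume_atom_py (line : String) (start : Int) : Prop := 0 ≤ start
instance (line : String) (start : Int) : Decidable (Pre_consume_atom_py line start) := by
  unfold Pre_consume_atom_py; infer_instance

def pvWitness_consume_atom_py : String × Int := ("  \"ab\\\"c\" rest", 0)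

def Spec_consume_atom_py (line : String) (start : Int) (out : Option String × Int) : Prop :=
  out = consume_atom_py_alt line start
instance (line : String) (start : Int) (out : Option String × Int) :
    Decidable (Spec_consume_atom_py line start out) := by
  unfold Spec_consume_atom_py; infer_instance

-- ===== CLAIM (what is proved, stated in full; the proofs are below) =====
def Claim_equal_consume_atom_py : Prop := ∀ (line : String) (start : Int),
  Dom_consume_atom_py line start → Pre_consume_atom_py line start →
  Spec_consume_atom_py line start (consume_atom_py line start)

-- ===== LEMMAS AND PROOFS =====

theorem drop_takeWhile_length {α : Type} (p : α → Bool) (xs : List α) :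
    xs.drop (xs.takeWhile p).length = xs.dropWhile p := by
  conv_lhs => rw [← List.takeWhile_append_dropWhile (p := p) (l := xs)]
  rw [List.drop_append_of_le_length (by simp)]
  simp

theorem take_takeWhile_length {α : Type} (p : α → Bool) (xs : List α) :
    xs.take (xs.takeWhile p).length = xs.takeWhile p := by
  have h := List.takeWhile_prefix (l := xs) p
  exact (List.prefix_iff_eq_take.mp h).symm

theorem skipSpacesA_eq (l : List Char) (n : Nat) :
    skipSpacesA l (n : Int) =
      ((n + ((l.drop n).takeWhile PySem.Chars.isspace).length : Nat) : Int) := by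
  rw [skipSpacesA]
  by_cases h : n < l.length
  · rw [dif_pos (by exact_mod_cast h)]
    rw [List.drop_eq_getElem_cons h]
    rw [PySem.List.pyGet?_natCast, List.getElem?_eq_getElem h]
    simp only [List.takeWhile_cons]
    by_cases hs : PySem.Chars.isspace l[n]
    · have hc : (n:Int) + 1 = ((n+1 : Nat) : Int) := by push_cast; ring
      rw [hs, if_pos rfl, hc, skipSpacesA_eq l (n+1)]
      simp; omega
    · simp [hs]
  · rw [dif_neg (by push_cast; omega)]
    rw [List.drop_eq_nil_of_le (by omega)]
    simp
termination_by l.length - n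
decreasing_by omega

theorem scanQuotedB_cons (c : Char) (rest : List Char) :
    scanQuotedB (c :: rest) =
      (if c = '"' then some ([], 1)
       else if c = '\\' ∧ rest ≠ [] then
         match rest with
         | [] => none
         | e :: rest' =>
           match scanQuotedB rest' with
           | none => none
           | some (t, k) => some (e :: t, k + 2)
       else
         match scanQuotedB rest with
         | none => none
         | some (t, k) => some (c :: t, k + 1)) := by
  rw [scanQuotedB.eq_def]





theorem quotedLoopA_eq (l : List Char) (n : Nat) (acc : List Char) (s0 : Int) :
    quotedLoopA l (n : Int) acc s0 =
      (match scanQuotedB (l.drop n) with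
       | none => (none, s0)
       | some (t, k) => (some (String.ofList (acc ++ t)), ((n + k : Nat) : Int))) := by
  rw [quotedLoopA]
  by_cases h : n < l.length
  · rw [dif_pos (by exact_mod_cast h)]
    rw [List.drop_eq_getElem_cons h]
    rw [PySem.List.pyGet?_natCast, List.getElem?_eq_getElem h]
    rw [scanQuotedB_cons]
    dsimp only
    by_cases hq : l[n] = '"'
    · rw [if_pos hq, if_neg (by simp [hq]), if_pos hq]
      dsimp only
      simp
      try omega
    · rw [if_neg hq]
      by_cases hb : l[n] = '\\' ∧ n + 1 < l.length
      · have h1 : n + 1 < l.length := hb.2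
        have hrest : l.drop (n+1) = l[n+1] :: l.drop (n+2) := List.drop_eq_getElem_cons h1
        have hbi : l[n] = '\\' ∧ (n:Int) + 1 < (l.length:Int) := ⟨hb.1, by exact_mod_cast h1⟩
        have hbd : l[n] = '\\' ∧ l.drop (n+1) ≠ [] := ⟨hb.1, by
          rw [ne_eq, List.drop_eq_nil_iff]; omega⟩
        rw [if_pos hbi, if_pos hbd, if_neg hq]
        have hc1 : (n:Int) + 1 = ((n+1 : Nat) : Int) := by push_cast; ring
        have hc2 : (n:Int) + 2 = ((n+2 : Nat) : Int) := by push_cast; ring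
        rw [hc1, hc2, PySem.List.pyGet?_natCast, List.getElem?_eq_getElem h1]
        dsimp only
        rw [quotedLoopA_eq l (n+2) (acc ++ [l[n+1]]) s0]
        rw [hrest]
        dsimp only
        cases hscan : scanQuotedB (l.drop (n+2)) with
        | none => rfl
        | some tk =>
          obtain ⟨t, k⟩ := tk
          dsimp only
          simp only [Prod.mk.injEq]
          constructor
          · simp
          · push_cast; ring
      · have hb2 : ¬ (l[n] = '\\' ∧ (n:Int) + 1 < (l.length:Int)) := by
          intro hx
          exact hb ⟨hx.1, by exact_mod_cast hx.2⟩
        have hb3 : ¬ (l[n] = '\\' ∧ l.drop (n+1) ≠ []) := by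
          intro hx
          have hy := hx.2
          rw [ne_eq, List.drop_eq_nil_iff] at hy
          exact hb ⟨hx.1, by omega⟩
        rw [if_neg hb2, if_neg hb3, if_neg hq]
        have hc1 : (n:Int) + 1 = ((n+1 : Nat) : Int) := by push_cast; ring
        rw [hc1, quotedLoopA_eq l (n+1) (acc ++ [l[n]]) s0]
        cases hscan : scanQuotedB (l.drop (n+1)) with
        | none => rfl
        | some tk =>
          obtain ⟨t, k⟩ := tk
          dsimp only
          simp only [Prod.mk.injEq]
          constructor
          · simp
          · push_cast; ring
  · rw [dif_neg (by push_cast; omega)]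
    rw [List.drop_eq_nil_of_le (by omega)]
    rfl
termination_by l.length - n
decreasing_by all_goals omega


theorem atomLoopA_eq (l : List Char) (n : Nat) :
    atomLoopA l (n : Int) =
      ((n + ((l.drop n).takeWhile (fun c => !PySem.Chars.isspace c)).length : Nat) : Int) := by
  rw [atomLoopA]
  by_cases h : n < l.length
  · rw [dif_pos (by exact_mod_cast h)]
    rw [List.drop_eq_getElem_cons h]
    rw [PySem.List.pyGet?_natCast, List.getElem?_eq_getElem h]
    simp only [List.takeWhile_cons]
    by_cases hs : PySem.Chars.isspace l[n]
    · simp [hs]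
    · have hc : (n:Int) + 1 = ((n+1 : Nat) : Int) := by push_cast; ring
      rw [if_neg (by simp [hs]), hc, atomLoopA_eq l (n+1)]
      simp [hs]
      omega
  · rw [dif_neg (by push_cast; omega)]
    rw [List.drop_eq_nil_of_le (by omega)]
    simp
termination_by l.length - n
decreasing_by omega

-- ===== VERDICT (by name: the statement is the Claim_ definition above) =====

theorem consume_atom_py_spec : Claim_equal_consume_atom_py := by
  intro line start _ hpre
  unfold Spec_consume_atom_py Pre_consume_atom_py at *
  obtain ⟨m, rfl⟩ : ∃ m : Nat, start = (m : Int) :=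
    ⟨start.toNat, (Int.toNat_of_nonneg hpre).symm⟩
  unfold consume_atom_py consume_atom_py_alt
  dsimp only
  set l := line.toList with hl
  have hrest0 : PySem.List.slice l (some (m:Int)) none = l.drop m := by
    rw [PySem.List.slice_from l (by positivity)]
    simp
  have hlstrip : PySem.Chars.lstrip (l.drop m) = (l.drop m).dropWhile PySem.Chars.isspace := by
    simp [PySem.Chars.lstrip]
  set tw := ((l.drop m).takeWhile PySem.Chars.isspace).length with htw
  have htwle : tw ≤ (l.drop m).length := by
    rw [htw]; exact List.Sublist.length_le (List.takeWhile_sublist PySem.Chars.isspace)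
  have hstripped : (l.drop m).dropWhile PySem.Chars.isspace = l.drop (m + tw) := by
    rw [← drop_takeWhile_length PySem.Chars.isspace (l.drop m), ← htw, List.drop_drop,
      Nat.add_comm]
  have hskip := skipSpacesA_eq l m
  rw [← htw] at hskip
  rw [hskip, hrest0, hlstrip, hstripped]
  have hlenstr : (l.drop (m + tw)).length = (l.drop m).length - tw := by
    rw [← hstripped, ← drop_takeWhile_length PySem.Chars.isspace (l.drop m), ← htw]
    simp
    omega
  have hib : (m:Int) + (((l.drop m).length : Int) - ((l.drop (m+tw)).length : Int))
      = ((m + tw : Nat) : Int) := by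
    rw [hlenstr]; push_cast; omega
  rw [hib]
  cases hsd : l.drop (m + tw) with
  | nil =>
    have hge : l.length ≤ m + tw := by
      rw [← List.drop_eq_nil_iff]; exact hsd
    rw [if_pos (by exact_mod_cast hge)]
  | cons c rest =>
    have hm : m + tw < l.length := by
      by_contra hcon
      rw [List.drop_eq_nil_of_le (by omega)] at hsd
      simp at hsd
    have hdg := List.drop_eq_getElem_cons hm
    rw [hsd] at hdg
    obtain ⟨hc, hrest2⟩ : c = l[m + tw] ∧ rest = l.drop (m + tw + 1) :=
      List.cons_eq_cons.mp hdg
    replace hrest2 : l.drop (m + tw + 1) = rest := hrest2.symm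
    rw [if_neg (by push_cast; try omega)]
    rw [PySem.List.pyGet?_natCast, List.getElem?_eq_getElem hm, ← hc]
    dsimp only
    by_cases hq : c = '"'
    · rw [if_pos hq, if_pos hq]
      have hc1 : ((m + tw : Nat) : Int) + 1 = ((m + tw + 1 : Nat) : Int) := by push_cast; ring
      rw [hc1, quotedLoopA_eq l (m + tw + 1) [] ((m + tw : Nat) : Int), hrest2]
      cases hscan : scanQuotedB rest with
      | none => rfl
      | some tk =>
        obtain ⟨t, k⟩ := tk
        dsimp only
        simp only [Prod.mk.injEq, List.nil_append]
        exact ⟨trivial, by push_cast; ring⟩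
    · rw [if_neg hq, if_neg hq]
      by_cases hbr : c = '{'
      · rw [if_pos hbr, if_pos hbr]
        have hff := PySem.Chars.findFrom_natCast l ['}'] (m + tw) (by omega)
        rw [hsd] at hff
        rw [hff]
        by_cases hfneg : PySem.Chars.find (c :: rest) ['}'] = -1
        · rw [if_pos hfneg, if_pos rfl, if_pos (by omega : PySem.Chars.find (c :: rest) ['}'] < 0)]
        · have hf0 : 0 ≤ PySem.Chars.find (c :: rest) ['}'] := by
            have := PySem.Chars.neg_one_le_find (c :: rest) ['}']
            omega
          obtain ⟨eB, heB⟩ : ∃ eB : Nat, PySem.Chars.find (c :: rest) ['}'] = (eB : Int) :=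
            ⟨(PySem.Chars.find (c :: rest) ['}']).toNat, (Int.toNat_of_nonneg hf0).symm⟩
          rw [if_neg hfneg, heB]
          rw [if_neg (by omega : ¬ ((m + tw : Nat) : Int) + (eB : Int) = -1)]
          rw [if_neg (by omega : ¬ ((eB : Nat) : Int) < 0)]
          -- length-token slices agree
          have hsl1 : PySem.List.slice l (some (((m + tw : Nat) : Int) + 1))
              (some (((m + tw : Nat) : Int) + (eB : Int)))
              = PySem.List.slice (c :: rest) (some (1 : Int)) (some (eB : Int)) := by
            have e1 : ((m + tw : Nat) : Int) + 1 = ((m + tw + 1 : Nat) : Int) := by push_cast; ring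
            have e2 : ((m + tw : Nat) : Int) + (eB : Int) = ((m + tw + eB : Nat) : Int) := by
              push_cast; ring
            have e3 : (1 : Int) = ((1 : Nat) : Int) := by norm_num
            rw [e1, e2, e3, PySem.List.slice_natCast, PySem.List.slice_natCast]
            rw [hrest2]
            simp only [List.drop_one, List.tail_cons]
            congr 1
            omega
          rw [hsl1]
          set num := PySem.Chars.strip (PySem.List.slice (c :: rest) (some (1:Int)) (some (eB : Int))) with hnum
          by_cases hdig : PySem.Chars.strIsdigit num
          · rw [if_neg (not_not_intro hdig), if_neg (not_not_intro hdig)]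
            cases hof : PySem.Int.ofStr? (String.ofList num) with
            | none => rfl
            | some L =>
              dsimp only
              have e4 : ((m + tw : Nat) : Int) + (eB : Int) + 1
                  = ((m + tw + eB + 1 : Nat) : Int) := by push_cast; ring
              rw [e4, skipSpacesA_eq l (m + tw + eB + 1)]
              have hremA : PySem.List.slice l
                  (some (((m + tw + eB + 1
                      + ((l.drop (m + tw + eB + 1)).takeWhile PySem.Chars.isspace).length : Nat)) : Int)) none
                  = (l.drop (m + tw + eB + 1)).dropWhile PySem.Chars.isspace := by
                rw [PySem.List.slice_from l (by positivity)]
                simp only [Int.toNat_natCast]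
                rw [← drop_takeWhile_length PySem.Chars.isspace (l.drop (m + tw + eB + 1))]
                rw [List.drop_drop]
                try congr 1
                try omega
              have htail : PySem.Chars.lstrip
                  (PySem.List.slice (c :: rest) (some ((eB : Int) + 1)) none)
                  = (l.drop (m + tw + eB + 1)).dropWhile PySem.Chars.isspace := by
                have e5 : (eB : Int) + 1 = ((eB + 1 : Nat) : Int) := by push_cast; ring
                rw [e5, PySem.List.slice_from (c :: rest) (by positivity)]
                simp only [Int.toNat_natCast, List.drop_succ_cons]
                rw [← hrest2, List.drop_drop]
                have e6 : m + tw + 1 + eB = m + tw + eB + 1 := by omega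
                rw [e6]
                simp [PySem.Chars.lstrip]
              rw [hremA, htail]
          · rw [if_pos hdig, if_pos hdig]
      · rw [if_neg hbr, if_neg hbr]
        have hatom := atomLoopA_eq l (m + tw)
        rw [hsd] at hatom
        rw [hatom]
        have hsl : PySem.List.slice l (some ((m + tw : Nat) : Int))
            (some (((m + tw + ((c :: rest).takeWhile fun ch => !PySem.Chars.isspace ch).length : Nat)) : Int))
            = (c :: rest).takeWhile (fun ch => !PySem.Chars.isspace ch) := by
          rw [PySem.List.slice_natCast, hsd]
          have : m + tw + ((c :: rest).takeWhile fun ch => !PySem.Chars.isspace ch).length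
              - (m + tw) = ((c :: rest).takeWhile fun ch => !PySem.Chars.isspace ch).length := by
            omega
          rw [this, take_takeWhile_length]
        rw [hsl]
        simp only [Prod.mk.injEq]
        exact ⟨trivial, by push_cast; ring⟩
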